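-- pv_equiv track=rewrite | github.com/PeterLauLukChen/GeoSeg | GeoSeg/Ochecker_reg.py | O_checker
-- ===== SOURCE A (Python) =====
-- def O_checker(arr):
--     increasing = decreasing = True
--     turning_point_found = False
--
--     for i in range(1, len(arr)):
--         if arr[i] > arr[i - 1]:
--             decreasing = False
--
--         elif arr[i] < arr[i - 1]:
--             if increasing:
--                 turning_point_found = True
--
--             increasing = False
--
--         else:
--             return 0
--
--     if increasing or decreasing:
--         return 1
--
--     elif turning_point_found:
--         return -1
-- ===== SOURCE B (Python) =====
-- def O_checker(arr):
--     # Stage 1: any plateau (equal adjacent pair) -> 0.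
--     if any(x == y for x, y in zip(arr, arr[1:])):
--         return 0
--     # Stage 2: strictly monotone iff equal to one of its sorted copies.
--     if arr == sorted(arr) or arr == sorted(arr, reverse=True):
--         return 1
--     return -1
-- ===== Notes on version B (the rewrite author's own statement) =====
-- stated objective: alternative
-- what changed: Replaces A's single flag-tracking scan by a staged formulation: one existence check for an equal adjacent pair (return 0), then a comparison of the whole array against its ascending and descending sorted copies to decide 1 vs -1; no direction flags or turning-point state at all.
import Mathlib
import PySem

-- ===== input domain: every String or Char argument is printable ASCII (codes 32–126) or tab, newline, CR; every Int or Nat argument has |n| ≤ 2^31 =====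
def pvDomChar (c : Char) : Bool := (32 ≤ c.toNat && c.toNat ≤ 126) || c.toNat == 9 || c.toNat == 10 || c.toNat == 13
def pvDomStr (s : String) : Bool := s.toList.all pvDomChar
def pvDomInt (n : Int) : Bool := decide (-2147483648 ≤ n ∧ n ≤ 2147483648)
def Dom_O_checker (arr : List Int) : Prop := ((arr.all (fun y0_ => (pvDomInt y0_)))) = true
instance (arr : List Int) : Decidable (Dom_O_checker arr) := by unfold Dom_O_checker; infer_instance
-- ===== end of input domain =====

-- B replaces A's flag-tracking scan by a staged formulation: an equal-adjacent-pair check,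
-- then comparison with the two sorted copies of the array (objective: alternative). A is total.

-- ===== PORT A =====
-- A's 'for i in range(1, len(arr))' with state (increasing, decreasing, turning_point_found);
-- the early 'return 0' is the non-recursive branch. A's implicit final 'return None' branch
-- (¬inc ∧ ¬dec ∧ ¬turn) is unreachable from the initial state; it is ported as 0.
def O_checker_go (arr : List Int) : List Int → Bool → Bool → Bool → Int
  | [], inc, dec, turn => if inc || dec then 1 else if turn then -1 else 0
  | i :: rest, inc, dec, turn =>
      if PySem.List.pyGetD arr i 0 > PySem.List.pyGetD arr (i - 1) 0 then
        O_checker_go arr rest inc false turn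
      else if PySem.List.pyGetD arr i 0 < PySem.List.pyGetD arr (i - 1) 0 then
        O_checker_go arr rest false dec (if inc then true else turn)
      else 0

def O_checker (arr : List Int) : Int :=
  O_checker_go arr (PySem.List.pyRange 1 (arr.length : Int) 1) true true false

-- ===== PORT B =====
-- Source B: 'any(x == y for x, y in zip(arr, arr[1:]))', then comparison with sorted copies.
def O_checker_alt (arr : List Int) : Int :=
  if (arr.zip (PySem.List.slice arr (some 1) none)).any (fun p => p.1 == p.2) then 0
  else if arr = PySem.List.sorted arr (fun x => x) false ∨
          arr = PySem.List.sorted arr (fun x => x) true then 1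
  else -1

-- ===== PRECONDITION & SPEC =====
def Spec_O_checker (arr : List Int) (out : Int) : Prop := out = O_checker_alt arr
instance (arr : List Int) (out : Int) : Decidable (Spec_O_checker arr out) := by unfold Spec_O_checker; infer_instance

-- ===== CLAIM (what is proved, stated in full; the proofs are below) =====
def Claim_equal_O_checker : Prop := ∀ (arr : List Int), Dom_O_checker arr → Spec_O_checker arr (O_checker arr)

-- ===== LEMMAS AND PROOFS =====

-- Characterisation of A's loop: over arr = pre ++ x :: l, starting at index pre.length+1 with
-- turn = !inc, the result is 0 if x :: l has an equal adjacent pair, else 1 if inc and the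
-- suffix is strictly increasing or dec and it is strictly decreasing, else -1.
lemma pvA_go (l : List Int) : ∀ (x : Int) (pre : List Int) (inc dec : Bool),
    O_checker_go (pre ++ x :: l) (PySem.List.pyRange ((pre.length : Int) + 1) ((pre.length : Int) + 1 + l.length) 1) inc dec (!inc)
      = if ¬ (x :: l).IsChain (· ≠ ·) then 0
        else if (inc = true ∧ (x :: l).IsChain (· < ·)) ∨ (dec = true ∧ (x :: l).IsChain (· > ·)) then 1
        else -1 := by
  induction l with
  | nil =>
    intro x pre inc dec
    rw [PySem.List.pyRange_one_eq_nil (by simp)]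
    simp only [O_checker_go, List.isChain_singleton]
    cases inc <;> cases dec <;> simp
  | cons y l' ih =>
    intro x pre inc dec
    have hlen : ((pre.length : Int) + 1) < ((pre.length : Int) + 1 + (y :: l').length) := by simp
    rw [PySem.List.pyRange_one_cons hlen]
    simp only [O_checker_go]
    have hy : PySem.List.pyGetD (pre ++ x :: y :: l') ((pre.length : Int) + 1) 0 = y := by
      have : ((pre.length : Int) + 1) = ((pre.length + 1 : Nat) : Int) := by omega
      rw [this, PySem.List.pyGetD_natCast, List.getD_eq_getElem?_getD]
      simp
    have hx : PySem.List.pyGetD (pre ++ x :: y :: l') ((pre.length : Int) + 1 - 1) 0 = x := by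
      have : ((pre.length : Int) + 1 - 1) = ((pre.length : Nat) : Int) := by omega
      rw [this, PySem.List.pyGetD_natCast, List.getD_eq_getElem?_getD]
      simp
    rw [hy, hx]
    have hassoc : pre ++ x :: y :: l' = (pre ++ [x]) ++ y :: l' := by simp
    have hidx : (pre.length : Int) + 1 + 1 = (((pre ++ [x]).length : Int) + 1) := by simp
    have hbound : (pre.length : Int) + 1 + (y :: l').length
        = (((pre ++ [x]).length : Int) + 1 + (l' : List Int).length) := by simp; ring
    by_cases hgt : y > x
    · rw [if_pos hgt, hassoc, hidx, hbound, ih y (pre ++ [x]) inc false]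
      have hne : x ≠ y := by omega
      have hngt : ¬ x > y := by omega
      simp [List.isChain_cons_cons, hne, hgt, hngt]
    · rw [if_neg hgt]
      by_cases hlt : y < x
      · rw [if_pos hlt]
        have hturn : (if inc then true else !inc) = !false := by cases inc <;> simp
        rw [hturn, hassoc, hidx, hbound, ih y (pre ++ [x]) false dec]
        have hne : x ≠ y := by omega
        have hnlt : ¬ x < y := by omega
        simp [List.isChain_cons_cons, hne, hnlt, hlt]
      · rw [if_neg hlt]
        have hxy : x = y := by omega
        simp [List.isChain_cons_cons, hxy]

-- B's stage-1 test is exactly ¬ Chain' (· ≠ ·).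
lemma pvZipAnyEq (arr : List Int) :
    ((arr.zip arr.tail).any (fun p => p.1 == p.2)) = !decide (arr.IsChain (· ≠ ·)) := by
  induction arr with
  | nil => simp
  | cons x l ih =>
    cases l with
    | nil => simp
    | cons y l' =>
      simp only [List.tail_cons, List.zip_cons_cons, List.any_cons, List.isChain_cons_cons]
      rw [List.tail_cons] at ih
      rw [ih]
      by_cases h : x = y <;> simp [h]

-- arr equals sorted(arr) iff arr is non-decreasing.
lemma pvSortedAscIff (arr : List Int) :
    arr = PySem.List.sorted arr (fun x => x) false ↔ arr.IsChain (· ≤ ·) := by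
  rw [List.isChain_iff_pairwise]
  constructor
  · intro h
    have := PySem.List.sorted_pairwise arr (fun x => x) (κ := Int)
    rw [← h] at this
    exact this
  · intro h
    exact (PySem.List.sorted_eq_self_of_pairwise arr (fun x => x) h).symm

-- arr equals sorted(arr, reverse=True) iff arr is non-increasing.
lemma pvSortedDescIff (arr : List Int) :
    arr = PySem.List.sorted arr (fun x => x) true ↔ arr.IsChain (· ≥ ·) := by
  rw [List.isChain_iff_pairwise]
  constructor
  · intro h
    have := PySem.List.sorted_pairwise_rev arr (fun x => x) (κ := Int)
    rw [← h] at this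
    exact this
  · intro h
    exact (PySem.List.sorted_rev_eq_self_of_pairwise arr (fun x => x) h).symm

-- With no equal adjacent pair, non-strict and strict adjacent monotonicity coincide.
lemma pvChainLeLt (arr : List Int) (h : arr.IsChain (· ≠ ·)) :
    arr.IsChain (· ≤ ·) ↔ arr.IsChain (· < ·) := by
  induction arr with
  | nil => simp
  | cons x l ih =>
    cases l with
    | nil => simp
    | cons y l' =>
      rw [List.isChain_cons_cons] at h ⊢
      rw [List.isChain_cons_cons]
      have := ih h.2
      constructor
      · rintro ⟨h1, h2⟩; exact ⟨lt_of_le_of_ne h1 h.1, this.mp h2⟩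
      · rintro ⟨h1, h2⟩; exact ⟨le_of_lt h1, this.mpr h2⟩

lemma pvChainGeGt (arr : List Int) (h : arr.IsChain (· ≠ ·)) :
    arr.IsChain (· ≥ ·) ↔ arr.IsChain (· > ·) := by
  induction arr with
  | nil => simp
  | cons x l ih =>
    cases l with
    | nil => simp
    | cons y l' =>
      rw [List.isChain_cons_cons] at h ⊢
      rw [List.isChain_cons_cons]
      have := ih h.2
      constructor
      · rintro ⟨h1, h2⟩; exact ⟨lt_of_le_of_ne h1 h.1.symm, this.mp h2⟩
      · rintro ⟨h1, h2⟩; exact ⟨le_of_lt h1, this.mpr h2⟩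

-- ===== VERDICT (by name: the statement is the Claim_ definition above) =====
theorem O_checker_spec : Claim_equal_O_checker := by
  intro arr _
  unfold Spec_O_checker O_checker O_checker_alt
  rw [PySem.List.slice_from_one, pvZipAnyEq]
  cases arr with
  | nil => decide
  | cons x l =>
    have hmain := pvA_go l x [] true true
    simp only [List.nil_append, List.length_nil, Nat.cast_zero, zero_add] at hmain
    simp only [Bool.not_true] at hmain
    have hb : ((x :: l).length : Int) = 1 + (l.length : Int) := by simp; omega
    rw [hb, hmain]
    by_cases hch : List.IsChain (· ≠ ·) (x :: l)
    · simp only [hch, not_true_eq_false, if_false, decide_true, Bool.not_true,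
        Bool.false_eq_true, true_and, pvSortedAscIff, pvSortedDescIff,
        pvChainLeLt _ hch, pvChainGeGt _ hch]
    · simp [hch]
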